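-- pv_equiv track=rewrite | github.com/Dixon282005/GymSystem | ui/views/members_view.py | _parse_cedula
-- ===== SOURCE A (Python) =====
-- CEDULA_TYPES = ["V", "E", "J", "G", "P"]
--
-- def _parse_cedula(cedula: str) -> tuple[str, str]:
--     """Split 'V-12345678' into ('V', '12345678')."""
--     cedula = (cedula or "").strip().upper()
--     for prefix in CEDULA_TYPES:
--         if cedula.startswith(prefix + "-"):
--             return prefix, cedula[len(prefix) + 1:]
--         if cedula.startswith(prefix) and len(cedula) > 1 and cedula[1:].isdigit():
--             return prefix, cedula[1:]
--     # No prefix found, assume V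
--     digits = "".join(c for c in cedula if c.isdigit())
--     return "V", digits
-- ===== SOURCE B (Python) =====
-- CEDULA_TYPES = ["V", "E", "J", "G", "P"]
--
-- def _parse_cedula(cedula: str) -> tuple[str, str]:
--     """Split 'V-12345678' into ('V', '12345678')."""
--     norm = (cedula or "").strip().upper()
--     digits = "".join(c for c in norm if c.isdigit())
--     head, sep, tail = norm.partition("-")
--     if sep and head in CEDULA_TYPES:
--         return head, tail
--     if norm[:1] in CEDULA_TYPES and norm == norm[:1] + digits and len(norm) > 1:
--         return norm[:1], digits
--     return "V", digits
-- ===== Notes on version B (the rewrite author's own statement) =====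
-- stated objective: alternative
-- what changed: B replaces A's prefix-list scan with early returns by three staged whole-string computations: one digit-filter pass done up front, a str.partition on the first dash whose head being a cedula type handles the dashed form, and an equality test norm == norm[:1] + digits for the letter-then-digits form; A's per-prefix startswith/isdigit loop disappears.
import Mathlib
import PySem

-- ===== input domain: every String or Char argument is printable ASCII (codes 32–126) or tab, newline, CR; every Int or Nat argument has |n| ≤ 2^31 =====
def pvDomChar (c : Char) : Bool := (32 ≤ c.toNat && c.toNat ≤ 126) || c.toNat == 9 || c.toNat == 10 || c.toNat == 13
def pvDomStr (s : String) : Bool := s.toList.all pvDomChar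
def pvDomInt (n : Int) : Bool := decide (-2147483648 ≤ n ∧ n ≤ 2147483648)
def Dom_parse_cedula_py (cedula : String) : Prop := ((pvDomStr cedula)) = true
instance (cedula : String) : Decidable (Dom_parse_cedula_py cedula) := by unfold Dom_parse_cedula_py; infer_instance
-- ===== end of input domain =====

-- B replaces A's prefix-list scan (per-prefix startswith with early returns) by staged whole-string
-- computations: an up-front digit filter, a partition on the first '-', and an equality test
-- norm == norm[:1] + digits (objective: alternative decomposition).
-- Both ports work on List Char via PySem.Chars; in port A the single-character CEDULA_TYPES entries
-- are represented as Chars (exact: startswith(prefix + "-") with a one-char prefix is startswith on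
-- the two-char list), in port B as one-char lists (Python strings), matching each source.

-- ===== PORT A =====
def pvCedulaTypes : List Char := ['V', 'E', 'J', 'G', 'P']

-- the 'for prefix in CEDULA_TYPES' loop with its two early returns
def pvALoop (s : List Char) : List Char → String × String
  | [] => ("V", String.ofList (s.filter fun c => PySem.Chars.isdigit c))
  | p :: rest =>
    if PySem.Chars.startswith s ([p] ++ ['-']) then
      (String.ofList [p], String.ofList (PySem.Chars.slice s (some ((([p] : List Char).length : Int) + 1)) none))
    else if PySem.Chars.startswith s [p] ∧ 1 < s.length ∧ PySem.Chars.strIsdigit (PySem.Chars.slice s (some 1) none) then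
      (String.ofList [p], String.ofList (PySem.Chars.slice s (some 1) none))
    else pvALoop s rest

def parse_cedula_py (cedula : String) : String × String :=
  let s := PySem.Chars.upper (PySem.Chars.strip cedula.toList)
  pvALoop s pvCedulaTypes

-- ===== PORT B =====
-- CEDULA_TYPES of Source B: one-character Python strings, as one-character lists
def pvTypesS : List (List Char) := [['V'], ['E'], ['J'], ['G'], ['P']]

-- body of Source B after normalization: digits pass, partition("-") (head = takeWhile ≠'-',
-- sep nonempty iff a '-' occurs, tail = what follows it), then the two staged tests
def pvBBody (s : List Char) : String × String :=
  let digits := s.filter (fun c => PySem.Chars.isdigit c)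
  let head := s.takeWhile (fun c => c != '-')
  let rest := s.dropWhile (fun c => c != '-')
  if rest ≠ [] ∧ pvTypesS.contains head then
    (String.ofList head, String.ofList rest.tail)
  else if pvTypesS.contains (s.take 1) ∧ s = s.take 1 ++ digits ∧ 1 < s.length then
    (String.ofList (s.take 1), String.ofList digits)
  else ("V", String.ofList digits)

def parse_cedula_py_alt (cedula : String) : String × String :=
  pvBBody (PySem.Chars.upper (PySem.Chars.strip cedula.toList))

-- ===== PRECONDITION & SPEC =====
def Spec_parse_cedula_py (cedula : String) (out : String × String) : Prop := out = parse_cedula_py_alt cedula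
instance (cedula : String) (out : String × String) : Decidable (Spec_parse_cedula_py cedula out) := by unfold Spec_parse_cedula_py; infer_instance

-- ===== CLAIM (what is proved, stated in full; the proofs are below) =====
def Claim_equal_parse_cedula_py : Prop := ∀ (cedula : String), Dom_parse_cedula_py cedula → Spec_parse_cedula_py cedula (parse_cedula_py cedula)

-- ===== LEMMAS AND PROOFS =====

-- a head-case normal form for A's loop result, used as a stepping stone to pvBBody
def pvOldB : List Char → String × String
  | [] => ("V", String.ofList (([] : List Char).filter fun ch => PySem.Chars.isdigit ch))
  | c :: t =>
    if pvCedulaTypes.contains c then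
      if PySem.Chars.slice (c :: t) (some 1) (some 2) = ['-'] then
        (String.ofList [c], String.ofList (PySem.Chars.slice (c :: t) (some 2) none))
      else if 1 < (c :: t).length ∧ PySem.Chars.strIsdigit (PySem.Chars.slice (c :: t) (some 1) none) then
        (String.ofList [c], String.ofList (PySem.Chars.slice (c :: t) (some 1) none))
      else ("V", String.ofList ((c :: t).filter fun ch => PySem.Chars.isdigit ch))
    else ("V", String.ofList ((c :: t).filter fun ch => PySem.Chars.isdigit ch))

lemma pv_sw_cons (c p : Char) (t ps : List Char) :
    PySem.Chars.startswith (c :: t) (p :: ps) = ((p == c) && PySem.Chars.startswith t ps) := by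
  simp [PySem.Chars.startswith, List.isPrefixOf]

-- a non-matching prefix is skipped
lemma pvALoop_skip (c p : Char) (t l : List Char) (hpc : (p == c) = false) :
    pvALoop (c :: t) (p :: l) = pvALoop (c :: t) l := by
  simp [pvALoop, pv_sw_cons, hpc]

-- when the head char matches none of the prefixes, the loop falls through to the default
lemma pvALoop_not_mem (c : Char) (t : List Char) (l : List Char) (h : c ∉ l) :
    pvALoop (c :: t) l = ("V", String.ofList ((c :: t).filter fun ch => PySem.Chars.isdigit ch)) := by
  induction l with
  | nil => simp [pvALoop]
  | cons p rest ih =>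
    rw [pvALoop_skip c p t rest (by simp at h ⊢; exact fun e => h.1 e.symm)]
    exact ih (fun hm => h (List.mem_cons_of_mem _ hm))

lemma pv_slice12 (c : Char) (t : List Char) :
    PySem.Chars.slice (c :: t) (some 1) (some 2) = t.take 1 := by
  simp [PySem.List.slice_toNat]

lemma pv_dash (c : Char) (t : List Char) :
    PySem.Chars.startswith (c :: t) ([c] ++ ['-']) =
      decide (PySem.Chars.slice (c :: t) (some 1) (some 2) = ['-']) := by
  rw [pv_slice12]
  cases t with
  | nil => simp [PySem.Chars.startswith]
  | cons d u =>
    by_cases hd : d = '-'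
    · simp [PySem.Chars.startswith, List.isPrefixOf, hd]
    · simp [PySem.Chars.startswith, List.isPrefixOf, hd]
      exact fun e => hd e.symm

-- at the matching prefix, one loop step equals the normal form's branch
lemma pvALoop_hit (c : Char) (t rest : List Char) (hrest : c ∉ rest) :
    pvALoop (c :: t) (c :: rest) =
      (if PySem.Chars.slice (c :: t) (some 1) (some 2) = ['-'] then
        (String.ofList [c], String.ofList (PySem.Chars.slice (c :: t) (some 2) none))
      else if 1 < (c :: t).length ∧ PySem.Chars.strIsdigit (PySem.Chars.slice (c :: t) (some 1) none) then
        (String.ofList [c], String.ofList (PySem.Chars.slice (c :: t) (some 1) none))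
      else ("V", String.ofList ((c :: t).filter fun ch => PySem.Chars.isdigit ch))) := by
  simp only [pvALoop, pv_dash]
  by_cases h1 : PySem.Chars.slice (c :: t) (some 1) (some 2) = ['-']
  · rw [if_pos (decide_eq_true h1), if_pos h1]
    norm_num
  · rw [if_neg (by simpa using h1), if_neg h1]
    have hsw : PySem.Chars.startswith (c :: t) [c] = true := by
      simp [PySem.Chars.startswith]
    by_cases h2 : 1 < (c :: t).length ∧ PySem.Chars.strIsdigit (PySem.Chars.slice (c :: t) (some 1) none) = true
    · rw [if_pos (show PySem.Chars.startswith (c :: t) [c] = true ∧ 1 < (c :: t).length ∧ PySem.Chars.strIsdigit (PySem.Chars.slice (c :: t) (some 1) none) = true from ⟨hsw, h2.1, h2.2⟩), if_pos h2]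
    · rw [if_neg (fun h => h2 ⟨h.2.1, h.2.2⟩), if_neg h2]
      exact pvALoop_not_mem c t rest hrest

-- the whole loop equals the head-case normal form
lemma pv_main (s : List Char) : pvALoop s pvCedulaTypes = pvOldB s := by
  cases s with
  | nil => decide
  | cons c t =>
    by_cases hc : pvCedulaTypes.contains c = true
    · show pvALoop (c :: t) pvCedulaTypes = _
      simp only [pvOldB]
      rw [if_pos hc]
      have hm : c = 'V' ∨ c = 'E' ∨ c = 'J' ∨ c = 'G' ∨ c = 'P' := by
        simpa [pvCedulaTypes] using hc
      rcases hm with h | h | h | h | h <;> subst h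
      · exact pvALoop_hit 'V' t ['E', 'J', 'G', 'P'] (by decide)
      · exact (pvALoop_skip 'E' 'V' t ['E', 'J', 'G', 'P'] (by decide)).trans
          (pvALoop_hit 'E' t ['J', 'G', 'P'] (by decide))
      · exact ((pvALoop_skip 'J' 'V' t ['E', 'J', 'G', 'P'] (by decide)).trans
          (pvALoop_skip 'J' 'E' t ['J', 'G', 'P'] (by decide))).trans
          (pvALoop_hit 'J' t ['G', 'P'] (by decide))
      · exact (((pvALoop_skip 'G' 'V' t ['E', 'J', 'G', 'P'] (by decide)).trans
          (pvALoop_skip 'G' 'E' t ['J', 'G', 'P'] (by decide))).trans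
          (pvALoop_skip 'G' 'J' t ['G', 'P'] (by decide))).trans
          (pvALoop_hit 'G' t ['P'] (by decide))
      · exact ((((pvALoop_skip 'P' 'V' t ['E', 'J', 'G', 'P'] (by decide)).trans
          (pvALoop_skip 'P' 'E' t ['J', 'G', 'P'] (by decide))).trans
          (pvALoop_skip 'P' 'J' t ['G', 'P'] (by decide))).trans
          (pvALoop_skip 'P' 'G' t ['P'] (by decide))).trans
          (pvALoop_hit 'P' t [] (by decide))
    · show pvALoop (c :: t) pvCedulaTypes = _
      simp only [pvOldB]
      rw [if_neg hc]
      exact pvALoop_not_mem c t pvCedulaTypes (by simpa using hc)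

-- membership in Source B's CEDULA_TYPES, characterized
lemma pvTypesS_mem (l : List Char) :
    l ∈ pvTypesS ↔ l = ['V'] ∨ l = ['E'] ∨ l = ['J'] ∨ l = ['G'] ∨ l = ['P'] := by
  simp [pvTypesS]

lemma pv_type_facts (c : Char) (hc : c ∈ pvCedulaTypes) :
    (c != '-') = true ∧ PySem.Chars.isdigit c = false := by
  have hm : c = 'V' ∨ c = 'E' ∨ c = 'J' ∨ c = 'G' ∨ c = 'P' := by
    simpa [pvCedulaTypes] using hc
  rcases hm with h | h | h | h | h <;> subst h <;> decide

-- the head-case normal form equals B's body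
lemma pv_bridge (s : List Char) : pvOldB s = pvBBody s := by
  cases s with
  | nil => decide
  | cons c t =>
    by_cases hc : c ∈ pvCedulaTypes
    · obtain ⟨hdash, hdig⟩ := pv_type_facts c hc
      have hcS : [c] ∈ pvTypesS := by
        have hm : c = 'V' ∨ c = 'E' ∨ c = 'J' ∨ c = 'G' ∨ c = 'P' := by
          simpa [pvCedulaTypes] using hc
        rw [pvTypesS_mem]
        rcases hm with h | h | h | h | h <;> simp [h]
      cases t with
      | nil =>
        have hL : pvOldB [c] = ("V", String.ofList []) := by
          simp [pvOldB, hc, hdig, PySem.List.slice_toNat]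
        have hR : pvBBody [c] = ("V", String.ofList []) := by
          simp [pvBBody, hdash, hdig]
        rw [hL, hR]
      | cons d u =>
        by_cases hd : d = '-'
        · subst hd
          have hL : pvOldB (c :: '-' :: u) = (String.ofList [c], String.ofList u) := by
            simp [pvOldB, hc, PySem.List.slice_toNat, PySem.List.slice_from]
          have hR : pvBBody (c :: '-' :: u) = (String.ofList [c], String.ofList u) := by
            simp [pvBBody, hdash, hcS]
          rw [hL, hR]
        · have hd' : (d != '-') = true := by simpa using hd
          have hheadnot : (c :: d :: u.takeWhile (fun ch => ch != '-')) ∉ pvTypesS := by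
            rw [pvTypesS_mem]
            simp
          by_cases hall : (d :: u).all PySem.Chars.isdigit = true
          · have hfilter : (d :: u).filter (fun ch => PySem.Chars.isdigit ch) = d :: u :=
              List.filter_eq_self.mpr (by simpa [List.all_eq_true] using hall)
            have hL : pvOldB (c :: d :: u) = (String.ofList [c], String.ofList (d :: u)) := by
              simp [pvOldB, hc, hd, PySem.List.slice_toNat, PySem.List.slice_from_one,
                PySem.Chars.strIsdigit, hall]
            have hR : pvBBody (c :: d :: u) = (String.ofList [c], String.ofList (d :: u)) := by
              simp [pvBBody, hdash, hd', hdig, hfilter, hcS, hheadnot]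
            rw [hL, hR]
          · have hallf : (d :: u).all PySem.Chars.isdigit = false := by
              simpa using hall
            have hfilter : ¬(d :: u = (d :: u).filter (fun ch => PySem.Chars.isdigit ch)) := by
              intro he
              have hat : (d :: u).all PySem.Chars.isdigit = true :=
                List.all_eq_true.mpr (by simpa [List.all_eq_true] using (List.filter_eq_self.mp he.symm))
              rw [hat] at hallf
              exact absurd hallf (by simp)
            have hL : pvOldB (c :: d :: u) =
                ("V", String.ofList ((d :: u).filter (fun ch => PySem.Chars.isdigit ch))) := by
              simp [pvOldB, hc, hd, PySem.List.slice_toNat, PySem.List.slice_from_one,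
                PySem.Chars.strIsdigit, hallf, hdig]
            have hR : pvBBody (c :: d :: u) =
                ("V", String.ofList ((d :: u).filter (fun ch => PySem.Chars.isdigit ch))) := by
              simp [pvBBody, hdash, hd', hdig, hfilter, hheadnot]
            rw [hL, hR]
    · have hL : pvOldB (c :: t) =
          ("V", String.ofList ((c :: t).filter (fun ch => PySem.Chars.isdigit ch))) := by
        simp [pvOldB, hc]
      have hm : ¬(c = 'V' ∨ c = 'E' ∨ c = 'J' ∨ c = 'G' ∨ c = 'P') := by
        simpa [pvCedulaTypes] using hc
      have hcS : [c] ∉ pvTypesS := by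
        rw [pvTypesS_mem]
        simpa using hm
      by_cases hdc : c = '-'
      · subst hdc
        have hR : pvBBody ('-' :: t) =
            ("V", String.ofList (('-' :: t).filter (fun ch => PySem.Chars.isdigit ch))) := by
          simp [pvBBody, pvTypesS_mem, hcS]
        rw [hL, hR]
      · have hd' : (c != '-') = true := by simpa using hdc
        have hheadnot : (c :: t.takeWhile (fun ch => ch != '-')) ∉ pvTypesS := by
          rw [pvTypesS_mem]
          rintro (h | h | h | h | h) <;>
            (rw [List.cons.injEq] at h; exact hm (by tauto))
        have hR : pvBBody (c :: t) =
            ("V", String.ofList ((c :: t).filter (fun ch => PySem.Chars.isdigit ch))) := by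
          simp [pvBBody, hd', hheadnot, hcS]
        rw [hL, hR]

-- ===== VERDICT (by name: the statement is the Claim_ definition above) =====
theorem parse_cedula_py_spec : Claim_equal_parse_cedula_py := by
  intro cedula _
  show parse_cedula_py cedula = parse_cedula_py_alt cedula
  unfold parse_cedula_py parse_cedula_py_alt
  exact (pv_main _).trans (pv_bridge _)
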